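-- pv_equiv track=rewrite | github.com/bartektroszka/AI-university | P3/zad2/zad2.py | any_possibilities
-- ===== SOURCE A (Python) =====
-- def any_possibilities(new_row, new_deploy, checked, history, possibilities):
--     if possibilities != []:
--         return True
--     if new_deploy == []:
--         return True
--     free_space = 0
--     for i in range(len(new_deploy)-1):
--         free_space += new_deploy[i+1] + 1
--     for i in range(0, len(new_row)- free_space - new_deploy[0] + 1):
--         return any_possibilities(new_row[i + new_deploy[0] + 1:], new_deploy[1:], checked + i + new_deploy[0] + 1, history + [i + checked], possibilities)
--
--     return False
-- ===== SOURCE B (Python) =====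
-- def any_possibilities(new_row, new_deploy, checked, history, possibilities):
--     if possibilities != []:
--         return True
--     while new_deploy != []:
--         free_space = sum(new_deploy[1:]) + len(new_deploy) - 1
--         if len(new_row) - free_space - new_deploy[0] + 1 > 0:
--             new_row = new_row[new_deploy[0] + 1:]
--             new_deploy = new_deploy[1:]
--         else:
--             return False
--     return True
-- ===== Notes on version B (the rewrite author's own statement) =====
-- stated objective: simpler
-- what changed: Replaced the tail recursion (whose for-loop always returns on its first iteration) by an explicit while-loop that checks possibilities once, computes free space as sum(rest)+len(rest) instead of an index loop, and drops the unused checked/history threading.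
import Mathlib
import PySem

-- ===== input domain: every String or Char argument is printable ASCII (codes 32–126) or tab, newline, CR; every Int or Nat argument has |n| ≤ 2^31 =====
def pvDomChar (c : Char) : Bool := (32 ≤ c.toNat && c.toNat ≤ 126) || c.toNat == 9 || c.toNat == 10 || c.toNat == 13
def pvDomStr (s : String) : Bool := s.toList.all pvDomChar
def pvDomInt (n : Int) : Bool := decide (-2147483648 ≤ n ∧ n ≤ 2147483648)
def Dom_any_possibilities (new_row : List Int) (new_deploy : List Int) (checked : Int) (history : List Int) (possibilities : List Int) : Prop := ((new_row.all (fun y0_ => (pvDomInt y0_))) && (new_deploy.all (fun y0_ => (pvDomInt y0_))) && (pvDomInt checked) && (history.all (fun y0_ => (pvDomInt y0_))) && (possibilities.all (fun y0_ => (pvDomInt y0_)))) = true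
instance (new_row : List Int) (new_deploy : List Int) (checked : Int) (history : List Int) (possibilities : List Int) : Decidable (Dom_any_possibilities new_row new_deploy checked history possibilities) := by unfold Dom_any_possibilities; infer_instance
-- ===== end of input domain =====

-- B replaces A's tail recursion (whose inner for-loop always returns on its first iteration) by an
-- explicit while-loop with a closed-form free-space sum, dropping the unused checked/history threading (objective: simpler).

-- ===== PORT A =====
def any_possibilities (new_row : List Int) (new_deploy : List Int) (checked : Int) (history : List Int) (possibilities : List Int) : Bool :=
  if possibilities ≠ [] then true
  else
    match new_deploy with
    | [] => true
    | d0 :: rest =>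
      -- free_space: for i in range(len(new_deploy)-1): free_space += new_deploy[i+1] + 1
      let free_space : Int :=
        (PySem.List.pyRange 0 (((d0 :: rest).length : Int) - 1) 1).foldl
          (fun acc i => acc + PySem.List.pyGetD (d0 :: rest) (i + 1) 0 + 1) 0
      -- for i in range(0, len(new_row) - free_space - new_deploy[0] + 1): return <recursive call>
      -- the body returns unconditionally, so only i = 0 is ever reached
      if 0 < (new_row.length : Int) - free_space - d0 + 1 then
        any_possibilities (PySem.List.slice new_row (some (0 + d0 + 1)) none) rest
          (checked + 0 + d0 + 1) (history ++ [0 + checked]) possibilities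
      else false

-- ===== PORT B =====
-- B: the possibilities check once, then a while-loop over new_deploy (checked/history are unused)
def pvAltLoop (new_row : List Int) (new_deploy : List Int) : Bool :=
  match new_deploy with
  | [] => true
  | d0 :: rest =>
    let free_space : Int := rest.sum + (rest.length : Int)
    if 0 < (new_row.length : Int) - free_space - d0 + 1 then
      pvAltLoop (PySem.List.slice new_row (some (d0 + 1)) none) rest
    else false

def any_possibilities_alt (new_row : List Int) (new_deploy : List Int) (checked : Int) (history : List Int) (possibilities : List Int) : Bool :=
  if possibilities ≠ [] then true
  else pvAltLoop new_row new_deploy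

-- ===== PRECONDITION & SPEC =====
def Spec_any_possibilities (new_row : List Int) (new_deploy : List Int) (checked : Int) (history : List Int) (possibilities : List Int) (out : Bool) : Prop := out = any_possibilities_alt new_row new_deploy checked history possibilities
instance (new_row : List Int) (new_deploy : List Int) (checked : Int) (history : List Int) (possibilities : List Int) (out : Bool) : Decidable (Spec_any_possibilities new_row new_deploy checked history possibilities out) := by unfold Spec_any_possibilities; infer_instance

-- ===== CLAIM (what is proved, stated in full; the proofs are below) =====
def Claim_equal_any_possibilities : Prop := ∀ (new_row : List Int) (new_deploy : List Int) (checked : Int) (history : List Int) (possibilities : List Int), Dom_any_possibilities new_row new_deploy checked history possibilities → Spec_any_possibilities new_row new_deploy checked history possibilities (any_possibilities new_row new_deploy checked history possibilities)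

-- ===== LEMMAS AND PROOFS =====

-- folding acc+x+1 over a list adds its sum and its length
theorem pv_foldl_sum (l : List Int) : ∀ (s : Int), l.foldl (fun acc x => acc + x + 1) s = s + l.sum + (l.length : Int) := by
  induction l with
  | nil => intro s; simp
  | cons y ys ih => intro s; simp only [List.foldl_cons]; rw [ih]; simp [List.sum_cons]; ring

-- A's free-space index loop over new_deploy = d0 :: rest sums rest.sum + rest.length
theorem pv_free_space_eq (d0 : Int) (rest : List Int) :
    (PySem.List.pyRange 0 (((d0 :: rest).length : Int) - 1) 1).foldl
      (fun acc i => acc + PySem.List.pyGetD (d0 :: rest) (i + 1) 0 + 1) 0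
    = rest.sum + (rest.length : Int) := by
  have hlen : ((d0 :: rest).length : Int) - 1 = (rest.length : Int) := by
    simp [List.length_cons]
  rw [hlen]
  have hcongr : (PySem.List.pyRange 0 (rest.length : Int) 1).foldl
      (fun acc i => acc + PySem.List.pyGetD (d0 :: rest) (i + 1) 0 + 1) 0
      = (PySem.List.pyRange 0 (rest.length : Int) 1).foldl
      (fun acc i => acc + PySem.List.pyGetD rest i 0 + 1) 0 := by
    apply PySem.List.foldl_congr_mem
    intro acc i hi
    have h0 : (0 : Int) ≤ i := (PySem.List.mem_pyRange_one.mp hi).1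
    obtain ⟨n, rfl⟩ := Int.eq_ofNat_of_zero_le h0
    have : ((n : Int) + 1) = ((n + 1 : Nat) : Int) := by push_cast; ring
    rw [this, PySem.List.pyGetD_natCast, PySem.List.pyGetD_natCast]
    simp
  rw [hcongr, PySem.List.foldl_pyRange_zero_pyGetD' rest 0 (fun acc x => acc + x + 1) 0]
  simpa using pv_foldl_sum rest 0

theorem pv_loop_eq (new_deploy : List Int) : ∀ (new_row : List Int) (checked : Int) (history : List Int),
    any_possibilities new_row new_deploy checked history [] = pvAltLoop new_row new_deploy := by
  induction new_deploy with
  | nil => intro nr c h; simp [any_possibilities, pvAltLoop]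
  | cons d0 rest ih =>
    intro nr c h
    rw [any_possibilities, pvAltLoop]
    simp only [ne_eq, not_true_eq_false, if_false, pv_free_space_eq]
    have harg : (0 : Int) + d0 + 1 = d0 + 1 := by ring
    rw [harg]
    split
    · exact ih _ _ _
    · rfl

-- ===== VERDICT (by name: the statement is the Claim_ definition above) =====
theorem any_possibilities_spec : Claim_equal_any_possibilities := by
  intro nr nd c h p _
  unfold Spec_any_possibilities any_possibilities_alt
  cases p with
  | nil => simpa using pv_loop_eq nd nr c h
  | cons q qs => rw [any_possibilities.eq_def]; simp
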